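-- pv_equiv track=rewrite | github.com/rmei6/DS-A | Maximum_Distinct.py | getMaximumDistinctCount
-- ===== SOURCE A (Python) =====
-- from collections import Counter
--
-- def getMaximumDistinctCount(a, b, k):
--     # Write your code here
--     a_count,b_count = Counter(a), Counter(b)
--     not_in_a = set()
--     for num in b_count:
--         if num not in a_count:
--             not_in_a.add(num)
--     space = 0
--     for num in a_count:
--         if a_count[num] > 1:
--             space += a_count[num] - 1
--     return len(a_count) + min(k,min(space,len(not_in_a)))
-- ===== SOURCE B (Python) =====
-- def getMaximumDistinctCount(a, b, k):
--     # Greedy simulation: scan b once, spending one duplicate slot of a and one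
--     # unit of swap budget per genuinely new element, stopping early when either runs out.
--     seen = set()
--     dups = 0
--     for x in a:
--         if x in seen:
--             dups += 1
--         else:
--             seen.add(x)
--     result = len(seen)
--     budget = k
--     for y in b:
--         if budget <= 0 or dups == 0:
--             break
--         if y not in seen:
--             seen.add(y)
--             dups -= 1
--             budget -= 1
--             result += 1
--     return result
-- ===== Notes on version B (the rewrite author's own statement) =====
-- stated objective: alternative
-- what changed: Replaces A's precomputed-counts-plus-closed-form-min (Counter, duplicate sum, not-in-a set, then distinct + min(k, space, not_in_a)) with a greedy simulation: one pass over a builds seen/dups, then a single pass over b performs swaps one at a time, decrementing an explicit budget and duplicate-slot counter and stopping early when either runs out; Pre_ restricts to the natural domain of nonnegative swap counts k.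
-- outside the precondition, e.g. on getMaximumDistinctCount([1, 1], [2], -1): A returns 0, B returns 1
import Mathlib
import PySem

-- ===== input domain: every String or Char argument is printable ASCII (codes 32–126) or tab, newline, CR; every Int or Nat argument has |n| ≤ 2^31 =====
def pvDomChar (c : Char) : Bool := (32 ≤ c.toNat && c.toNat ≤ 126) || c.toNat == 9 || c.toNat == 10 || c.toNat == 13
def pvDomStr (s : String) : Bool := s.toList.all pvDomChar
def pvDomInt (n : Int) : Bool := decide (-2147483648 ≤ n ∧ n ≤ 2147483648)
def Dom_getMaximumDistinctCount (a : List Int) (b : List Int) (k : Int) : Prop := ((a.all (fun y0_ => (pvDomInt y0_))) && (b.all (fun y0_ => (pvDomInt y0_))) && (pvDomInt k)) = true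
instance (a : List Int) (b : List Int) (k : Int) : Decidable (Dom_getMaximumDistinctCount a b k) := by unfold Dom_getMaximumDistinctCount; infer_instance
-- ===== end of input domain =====

-- B replaces A's closed-form min over precomputed counts by a greedy single-pass
-- simulation over b with an explicit swap budget and early termination (alternative
-- decomposition, same exact result); Pre_ restricts to the natural domain 0 ≤ k.


-- ===== PORT A =====
def getMaximumDistinctCount (a : List Int) (b : List Int) (k : Int) : Int :=
  let a_count := PySem.Dict.counter a
  let b_count := PySem.Dict.counter b
  let not_in_a := b_count.keys.foldl
    (fun s num => if a_count.contains num then s else PySem.Set.add s num)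
    PySem.Set.empty
  let space := a_count.keys.foldl
    (fun sp num => if a_count.getD num 0 > 1 then sp + (a_count.getD num 0 - 1) else sp)
    (0 : Int)
  (a_count.size : Int) + min k (min space (PySem.Set.len not_in_a))

-- ===== PORT B =====
-- second loop of Source B: 'for y in b: if budget <= 0 or dups == 0: break; if y not in seen: ...'
def pvGreedyLoop (bs : List Int) (seen : PySem.Set Int) (dups budget result : Int) : Int :=
  match bs with
  | [] => result
  | y :: ys =>
    if budget ≤ 0 ∨ dups = 0 then result
    else if PySem.Set.contains seen y then pvGreedyLoop ys seen dups budget result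
    else pvGreedyLoop ys (PySem.Set.add seen y) (dups - 1) (budget - 1) (result + 1)

def getMaximumDistinctCount_alt (a : List Int) (b : List Int) (k : Int) : Int :=
  let st := a.foldl
    (fun (st : PySem.Set Int × Int) x =>
      if PySem.Set.contains st.1 x then (st.1, st.2 + 1) else (PySem.Set.add st.1 x, st.2))
    (PySem.Set.empty, (0 : Int))
  pvGreedyLoop b st.1 st.2 k (PySem.Set.len st.1)

-- ===== PRECONDITION & SPEC =====
-- Pre_ restricts to the natural domain of a swap count: 0 ≤ k. For k < 0 A still
-- returns distinct(a) + k (meaningless, below the count already present); B performs no swaps.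
def Pre_getMaximumDistinctCount (a : List Int) (b : List Int) (k : Int) : Prop := 0 ≤ k
instance (a : List Int) (b : List Int) (k : Int) : Decidable (Pre_getMaximumDistinctCount a b k) := by unfold Pre_getMaximumDistinctCount; infer_instance
def pvWitness_getMaximumDistinctCount : List Int × List Int × Int := ([1, 1], [2], 1)
def Spec_getMaximumDistinctCount (a : List Int) (b : List Int) (k : Int) (out : Int) : Prop := out = getMaximumDistinctCount_alt a b k
instance (a : List Int) (b : List Int) (k : Int) (out : Int) : Decidable (Spec_getMaximumDistinctCount a b k out) := by unfold Spec_getMaximumDistinctCount; infer_instance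

-- ===== CLAIM (what is proved, stated in full; the proofs are below) =====
def Claim_equal_getMaximumDistinctCount : Prop := ∀ (a : List Int) (b : List Int) (k : Int), Dom_getMaximumDistinctCount a b k → Pre_getMaximumDistinctCount a b k → Spec_getMaximumDistinctCount a b k (getMaximumDistinctCount a b k)

-- ===== LEMMAS AND PROOFS =====

-- ofList a is a permutation of Mathlib's a.dedup (both nodup, same members).
lemma ofList_perm_dedup (a : List Int) : (PySem.Set.ofList a).Perm a.dedup := by
  apply (List.perm_ext_iff_of_nodup (PySem.Set.nodup_ofList a) a.nodup_dedup).mpr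
  intro x
  rw [PySem.Set.mem_ofList, List.mem_dedup]

lemma sum_count_ofList (a : List Int) :
    ((PySem.Set.ofList a).map (fun x => (a.count x : Int))).sum = (a.length : Int) := by
  have h := ((ofList_perm_dedup a).map (fun x => (a.count x : Int))).sum_eq
  rw [h]
  have := List.sum_map_count_dedup_eq_length a
  have : (a.dedup.map (fun x => (a.count x : Int))).sum
      = ((a.dedup.map (fun x => a.count x)).sum : Int) := by
    simp [List.map_map, Function.comp_def]
  omega

-- A's space loop, generalized over the starting accumulator
lemma space_loop (a : List Int) (l : List Int) (init : Int) (hl : ∀ x ∈ l, x ∈ a) :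
    l.foldl (fun sp num => if (a.count num : Int) > 1 then sp + ((a.count num : Int) - 1) else sp) init
      = init + (l.map (fun x => (a.count x : Int) - 1)).sum := by
  induction l generalizing init with
  | nil => simp
  | cons x xs ih =>
    have hx : 1 ≤ a.count x := List.count_pos_iff.mpr (hl x (by simp))
    have hrec := ih (hl := fun y hy => hl y (by simp [hy]))
    by_cases h : (a.count x : Int) > 1
    · simp only [List.foldl_cons, List.map_cons, List.sum_cons, if_pos h, hrec]; ring
    · have h1 : (a.count x : Int) = 1 := by omega
      simp only [List.foldl_cons, List.map_cons, List.sum_cons, hrec, h1]; simp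

-- A's not_in_a loop builds exactly l.filter (¬ contains) when l is nodup and fresh w.r.t. s
lemma notin_loop (a : List Int) (l : List Int) (s : List Int)
    (hnd : l.Nodup) (hfresh : ∀ x ∈ l, x ∉ s) :
    l.foldl (fun s num => if a.contains num then s else PySem.Set.add s num) s
      = s ++ l.filter (fun x => !a.contains x) := by
  induction l generalizing s with
  | nil => simp
  | cons x xs ih =>
    have hnd' := hnd.of_cons
    by_cases h : a.contains x
    · simp only [List.foldl_cons, h, if_pos, List.filter_cons, Bool.not_true]
      simpa using ih s hnd' (fun y hy => hfresh y (by simp [hy]))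
    · have hxmem : x ∉ s := hfresh x (by simp)
      have hxa : x ∉ a := by simpa using h
      have hadd : PySem.Set.add s x = s ++ [x] := by
        simp [PySem.Set.add, PySem.Set.contains, List.contains_eq_mem, hxmem]
      simp only [List.foldl_cons, if_neg h, hadd, List.filter_cons]
      have hfresh' : ∀ y ∈ xs, y ∉ s ++ [x] := by
        intro y hy
        simp only [List.mem_append, List.mem_singleton]
        rintro (hs | rfl)
        · exact hfresh y (by simp [hy]) hs
        · exact (List.nodup_cons.mp hnd).1 hy
      rw [ih (s ++ [x]) hnd' hfresh']
      simp [hxa]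

-- B's first loop: state is (Set.update s xs, dups counted as length deficit)
lemma loop1_eq (xs : List Int) (s : PySem.Set Int) (d : Int) :
    xs.foldl
      (fun (st : PySem.Set Int × Int) x =>
        if PySem.Set.contains st.1 x then (st.1, st.2 + 1) else (PySem.Set.add st.1 x, st.2))
      (s, d)
    = (PySem.Set.update s xs,
       d + (s.length : Int) + xs.length - (PySem.Set.update s xs).length) := by
  induction xs generalizing s d with
  | nil => simp [PySem.Set.update]
  | cons x xs ih =>
    simp only [List.foldl_cons]
    by_cases h : x ∈ s
    · have hc : PySem.Set.contains s x = true := by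
        simp [PySem.Set.contains, List.contains_eq_mem, h]
      have hup : PySem.Set.update s (x :: xs) = PySem.Set.update s xs := by
        rw [PySem.Set.update_cons, PySem.Set.add_of_mem h]
      rw [if_pos hc, ih, hup]
      refine Prod.ext rfl ?_
      simp only [List.length_cons]
      omega
    · have hc : ¬ PySem.Set.contains s x = true := by
        simp [PySem.Set.contains, List.contains_eq_mem, h]
      have hup : PySem.Set.update s (x :: xs) = PySem.Set.update (PySem.Set.add s x) xs := by
        rw [PySem.Set.update_cons]
      have hlen : (PySem.Set.add s x).length = s.length + 1 := by
        simp [PySem.Set.add_of_not_mem h]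
      rw [if_neg hc, ih, hup]
      refine Prod.ext rfl ?_
      simp only [List.length_cons, hlen]
      omega

-- the new-element count of Set.update, as an Int fact
lemma update_len (s : PySem.Set Int) (bs : List Int) :
    ((PySem.Set.update s bs).length : Int)
      = (s.length : Int) + ((PySem.Set.ofList bs).filter (fun y => !(PySem.Set.contains s y))).length := by
  rw [PySem.Set.update_eq_append_filter, List.length_append]
  push_cast; ring

-- B's greedy loop computes result + min(budget, dups, #new elements of bs)
lemma greedy_loop_eq (bs : List Int) (seen : PySem.Set Int) (dups budget result : Int)
    (hd : 0 ≤ dups) (hb : 0 ≤ budget) :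
    pvGreedyLoop bs seen dups budget result
      = result + min budget (min dups (((PySem.Set.update seen bs).length : Int) - seen.length)) := by
  induction bs generalizing seen dups budget result with
  | nil =>
    simp only [pvGreedyLoop, PySem.Set.update, List.foldl_nil]
    omega
  | cons y ys ih =>
    have hE : seen.length ≤ (PySem.Set.update seen (y :: ys)).length := by
      rw [PySem.Set.update_eq_append_filter, List.length_append]
      omega
    by_cases hstop : budget ≤ 0 ∨ dups = 0
    · simp only [pvGreedyLoop]
      rw [if_pos hstop]
      omega
    · by_cases hy : y ∈ seen
      · have hc : PySem.Set.contains seen y = true := by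
          simp [PySem.Set.contains, List.contains_eq_mem, hy]
        have hup : PySem.Set.update seen (y :: ys) = PySem.Set.update seen ys := by
          rw [PySem.Set.update_cons, PySem.Set.add_of_mem hy]
        simp only [pvGreedyLoop]
        rw [if_neg hstop, if_pos hc, ih seen dups budget result hd hb, hup]
      · have hc : ¬ PySem.Set.contains seen y = true := by
          simp [PySem.Set.contains, List.contains_eq_mem, hy]
        have hup : PySem.Set.update seen (y :: ys) = PySem.Set.update (PySem.Set.add seen y) ys := by
          rw [PySem.Set.update_cons]
        have hlen : (PySem.Set.add seen y).length = seen.length + 1 := by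
          simp [PySem.Set.add_of_not_mem hy]
        have hE' : (PySem.Set.add seen y).length ≤ (PySem.Set.update (PySem.Set.add seen y) ys).length := by
          rw [PySem.Set.update_eq_append_filter, List.length_append]
          omega
        simp only [pvGreedyLoop]
        rw [if_neg hstop, if_neg hc,
          ih (PySem.Set.add seen y) (dups - 1) (budget - 1) (result + 1) (by omega) (by omega),
          hup]
        omega

-- ===== VERDICT (by name: the statement is the Claim_ definition above) =====
theorem getMaximumDistinctCount_spec : Claim_equal_getMaximumDistinctCount := by
  intro a b k _ hk
  unfold Spec_getMaximumDistinctCount getMaximumDistinctCount getMaximumDistinctCount_alt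
  simp only [PySem.Dict.keys_counter]
  -- A: space loop value
  have hspace :
      (PySem.Set.ofList a).foldl
        (fun sp num => if (PySem.Dict.counter a).getD num 0 > 1 then sp + ((PySem.Dict.counter a).getD num 0 - 1) else sp)
        (0 : Int)
      = (a.length : Int) - ((PySem.Set.ofList a).length : Int) := by
    have hcongr : (PySem.Set.ofList a).foldl
        (fun sp num => if (PySem.Dict.counter a).getD num 0 > 1 then sp + ((PySem.Dict.counter a).getD num 0 - 1) else sp)
        (0 : Int)
      = (PySem.Set.ofList a).foldl
        (fun sp num => if (a.count num : Int) > 1 then sp + ((a.count num : Int) - 1) else sp)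
        (0 : Int) := by
      apply PySem.List.foldl_congr_mem
      intro acc x _
      rw [PySem.Dict.getD_counter]
    rw [hcongr, space_loop a _ 0 (fun x hx => (PySem.Set.mem_ofList a x).mp hx)]
    have hsum : ((PySem.Set.ofList a).map (fun x => (a.count x : Int) - 1)).sum
        = ((PySem.Set.ofList a).map (fun x => (a.count x : Int))).sum
          - ((PySem.Set.ofList a).length : Int) := by
      induction (PySem.Set.ofList a) with
      | nil => simp
      | cons y ys ih => simp only [List.map_cons, List.sum_cons, List.length_cons, ih]; push_cast; ring
    rw [hsum, sum_count_ofList]; ring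
  -- A: not_in_a loop value
  have hnot :
      (PySem.Set.ofList b).foldl
        (fun s num => if (PySem.Dict.counter a).contains num then s else PySem.Set.add s num)
        PySem.Set.empty
      = (PySem.Set.ofList b).filter (fun x => !(PySem.Set.contains (PySem.Set.ofList a) x)) := by
    have hcongr : (PySem.Set.ofList b).foldl
        (fun s num => if (PySem.Dict.counter a).contains num then s else PySem.Set.add s num)
        PySem.Set.empty
      = (PySem.Set.ofList b).foldl
        (fun s num => if a.contains num then s else PySem.Set.add s num)
        PySem.Set.empty := by
      apply PySem.List.foldl_congr_mem
      intro acc x _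
      rw [PySem.Dict.contains_counter]
    rw [hcongr, notin_loop a _ _ (PySem.Set.nodup_ofList b) (by simp [PySem.Set.empty])]
    simp only [PySem.Set.empty, List.nil_append]
    apply List.filter_congr
    intro x hx
    simp [PySem.Set.contains, List.contains_eq_mem, PySem.Set.mem_ofList]
  rw [hspace, hnot]
  -- B: first loop
  rw [loop1_eq a PySem.Set.empty 0]
  have hupd0 : PySem.Set.update PySem.Set.empty a = PySem.Set.ofList a := PySem.Set.update_nil_left a
  simp only [hupd0]
  -- B: greedy loop
  have hdups : (0 : Int) ≤ 0 + ((PySem.Set.empty : PySem.Set Int).length : Int) + a.length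
      - (PySem.Set.ofList a).length := by
    have := PySem.Set.length_ofList_le a
    simp only [PySem.Set.empty, List.length_nil]
    omega
  rw [greedy_loop_eq b (PySem.Set.ofList a) _ k _ hdups hk]
  rw [update_len]
  have hsize : ((PySem.Dict.counter a).size : Int) = ((PySem.Set.ofList a).length : Int) := by
    have h1 : (PySem.Dict.counter a).keys.length = (PySem.Set.ofList a).length := by
      rw [PySem.Dict.keys_counter]
    simp only [PySem.Dict.keys, List.length_map] at h1
    simp [PySem.Dict.size, h1]
  rw [hsize]
  simp only [PySem.Set.len, PySem.Set.empty, List.length_nil]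
  omega
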